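-- pv_equiv track=rewrite | github.com/danyow-cheung/Algorithms_python | leetcode/string_1859.py | sortSentence
-- ===== SOURCE A (Python) =====
-- def sortSentence(s):
--     """
--     :type s: str
--     :rtype: str
--     """
--     output =""
--     sarray = s.split()
--
--     for i in range(1,10):
--         for word in sarray:
--             if word[-1]==str(i):
--                 output+=" "+word[:-1]
--     return output.strip()
-- ===== SOURCE B (Python) =====
-- def sortSentence(s):
--     words = [w for w in s.split() if w[-1] in "123456789"]
--     words.sort(key=lambda w: w[-1])
--     return "".join(" " + w[:-1] for w in words).strip()
-- ===== Notes on version B (the rewrite author's own statement) =====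
-- stated objective: idiomatic
-- what changed: A rescans the split word list nine times (once per trailing digit 1..9), concatenating matches; B filters the words whose last character is a digit 1-9 once and stable-sorts them by that character, then emits them in one pass.
import Mathlib
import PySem

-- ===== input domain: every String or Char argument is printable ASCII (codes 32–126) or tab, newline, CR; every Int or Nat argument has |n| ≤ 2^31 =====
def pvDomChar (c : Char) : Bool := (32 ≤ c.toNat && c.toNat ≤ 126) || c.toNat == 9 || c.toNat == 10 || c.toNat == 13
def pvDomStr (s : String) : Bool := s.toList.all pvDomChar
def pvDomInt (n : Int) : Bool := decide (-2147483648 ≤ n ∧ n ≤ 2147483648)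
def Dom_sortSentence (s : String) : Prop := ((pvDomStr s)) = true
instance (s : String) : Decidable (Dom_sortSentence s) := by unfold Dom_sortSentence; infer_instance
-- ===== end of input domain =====

-- B replaces A's nine rescans of the word list (one per trailing digit) with a single
-- filter + stable sort on the trailing digit (objective: idiomatic/alternative).

-- ===== PORT A =====
-- Literal port of A: for i in 1..9, rescan the split words and append " "+word[:-1]
-- whenever word[-1] == str(i); finally strip.  (Python's 1-char string word[-1] is
-- represented as the singleton char list [c]; str(i) as (Int.toStr i).toList.)
def sortSentence (s : String) : String :=
  let sarray := PySem.Chars.split₀ s.toList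
  let output : List Char :=
    (PySem.List.pyRange 1 10 1).foldl (fun output i =>
      sarray.foldl (fun output word =>
        if ((PySem.List.pyGet? word (-1)).map (fun c => [c]) == some (PySem.Int.toStr i).toList)
        then output ++ [' '] ++ PySem.List.slice word none (some (-1))
        else output) output) []
  String.ofList (PySem.Chars.strip output)

-- ===== PORT B =====
-- Literal port of Source B: filter words whose last char is in "123456789" (a 1-char
-- substring test equals char membership), stable-sort by last char (key w[-1];
-- split words are never empty, so the getD default is never used), join and strip.
def sortSentence_alt (s : String) : String :=
  let words := (PySem.Chars.split₀ s.toList).filter (fun w =>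
      match PySem.List.pyGet? w (-1) with
      | some c => ("123456789".toList).contains c
      | none => false)
  let sortedWords := PySem.List.sorted words (fun w => (PySem.List.pyGet? w (-1)).getD ' ') false
  String.ofList (PySem.Chars.strip
    (PySem.Chars.join [] (sortedWords.map (fun w => [' '] ++ PySem.List.slice w none (some (-1))))))

-- ===== PRECONDITION & SPEC =====
def Spec_sortSentence (s : String) (out : String) : Prop := out = sortSentence_alt s
instance (s : String) (out : String) : Decidable (Spec_sortSentence s out) := by unfold Spec_sortSentence; infer_instance

-- ===== CLAIM (what is proved, stated in full; the proofs are below) =====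
def Claim_equal_sortSentence : Prop := ∀ (s : String), Dom_sortSentence s → Spec_sortSentence s (sortSentence s)

-- ===== LEMMAS AND PROOFS =====

def pvKey (w : List Char) : Char := (PySem.List.pyGet? w (-1)).getD ' '

def pvG (w : List Char) : List Char := [' '] ++ PySem.List.slice w none (some (-1))

def pvB (w : List Char) : Bool :=
  match PySem.List.pyGet? w (-1) with
  | some c => ("123456789".toList).contains c
  | none => false

-- inner loop of A: a guarded append over the word list is filter-then-flatMap
theorem pvFoldlGuard (p : List Char → Bool) (l : List (List Char)) (acc : List Char) :
    l.foldl (fun a w => if p w then a ++ [' '] ++ PySem.List.slice w none (some (-1)) else a) acc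
      = acc ++ (l.filter p).flatMap pvG := by
  induction l generalizing acc with
  | nil => simp
  | cons w t ih =>
    rw [List.foldl_cons, ih]
    by_cases h : p w = true
    · simp [h, pvG]
    · simp [h]

-- outer loop of A
theorem pvOuter (sarray : List (List Char)) (is : List Int) (acc : List Char) :
    is.foldl (fun output i =>
      sarray.foldl (fun output word =>
        if ((PySem.List.pyGet? word (-1)).map (fun c => [c]) == some (PySem.Int.toStr i).toList)
        then output ++ [' '] ++ PySem.List.slice word none (some (-1))
        else output) output) acc
      = acc ++ is.flatMap (fun i =>
          (sarray.filter (fun w =>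
            (PySem.List.pyGet? w (-1)).map (fun c => [c]) == some (PySem.Int.toStr i).toList)).flatMap pvG) := by
  induction is generalizing acc with
  | nil => simp
  | cons i t ih =>
    rw [List.foldl_cons, ih, pvFoldlGuard]
    simp [List.flatMap_cons]

theorem pvJoinNil (l : List (List Char)) : PySem.Chars.join [] l = l.flatten := by
  simp [PySem.Chars.join, List.intercalate]
  induction l with
  | nil => simp
  | cons a t ih => cases t <;> simp_all [List.intersperse]

-- insertBy walks past a block it does not insert into
theorem pvInsertBy_skip {α : Type} (before : α → α → Bool) (x : α) (l1 l2 : List α)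
    (h : ∀ y ∈ l1, before x y = false) :
    PySem.List.insertBy before x (l1 ++ l2) = l1 ++ PySem.List.insertBy before x l2 := by
  induction l1 with
  | nil => simp
  | cons a t ih =>
    have ha : before x a = false := h a (by simp)
    simp [PySem.List.insertBy, ha, ih (fun y hy => h y (by simp [hy]))]

-- insertBy puts x in front when everything compares greater
theorem pvInsertBy_front {α : Type} (before : α → α → Bool) (x : α) (l : List α)
    (h : ∀ y ∈ l, before x y = true) :
    PySem.List.insertBy before x l = x :: l := by
  cases l with
  | nil => rfl
  | cons a t => simp [PySem.List.insertBy, h a (by simp)]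

-- inserting x into the bucket concatenation appends it to its own (key x) bucket
theorem pvBucketsInsert (key : List Char → Char) (x : List Char) (D : List Char)
    (hD : D.Pairwise (· < ·)) (hx : key x ∈ D) (ys : List (List Char)) :
    PySem.List.insertBy (fun a b => decide (key a < key b)) x
        (D.flatMap (fun d => ys.filter (fun w => key w == d)))
      = D.flatMap (fun d => ys.filter (fun w => key w == d) ++ if key x == d then [x] else []) := by
  induction D with
  | nil => simp at hx
  | cons d D' ih =>
    have hlt : ∀ d' ∈ D', d < d' := (List.pairwise_cons.mp hD).1
    have hD' : D'.Pairwise (· < ·) := (List.pairwise_cons.mp hD).2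
    by_cases hxd : key x = d
    · -- x belongs to the first bucket: skip it, then insert in front of the rest
      have hskip : ∀ y ∈ ys.filter (fun w => key w == d),
          (fun a b => decide (key a < key b)) x y = false := by
        intro y hy
        have : key y = d := by simpa using (List.of_mem_filter hy)
        simp [this, hxd]
      have hfront : ∀ y ∈ D'.flatMap (fun d => ys.filter (fun w => key w == d)),
          (fun a b => decide (key a < key b)) x y = true := by
        intro y hy
        rcases List.mem_flatMap.mp hy with ⟨d', hd', hy'⟩
        have : key y = d' := by simpa using (List.of_mem_filter hy')
        simp [this, hxd]
        exact hlt d' hd'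
      rw [List.flatMap_cons, pvInsertBy_skip _ _ _ _ hskip, pvInsertBy_front _ _ _ hfront]
      have hbne : ∀ d' ∈ D',
          (ys.filter (fun w => key w == d') ++ if key x == d' then [x] else [])
            = ys.filter (fun w => key w == d') := by
        intro d' hd'
        have : (key x == d') = false := by
          simp [hxd]
          exact ne_of_lt (hlt d' hd')
        rw [this]
        simp
      rw [List.flatMap_cons, List.flatMap_congr hbne]
      have ht : (key x == d) = true := by simp [hxd]
      rw [ht]
      simp
    · -- x belongs further right: its key is greater than d, skip the d-bucket
      have hxD' : key x ∈ D' := by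
        rcases List.mem_cons.mp hx with h | h
        · exact absurd h hxd
        · exact h
      have hdx : d < key x := hlt _ hxD'
      have hskip : ∀ y ∈ ys.filter (fun w => key w == d),
          (fun a b => decide (key a < key b)) x y = false := by
        intro y hy
        have : key y = d := by simpa using (List.of_mem_filter hy)
        simp [this]
        exact le_of_lt hdx
      rw [List.flatMap_cons, pvInsertBy_skip _ _ _ _ hskip, ih hD' hxD']
      simp [List.flatMap_cons, hxd]

-- the stable sort by key equals the bucket concatenation
theorem pvSortedBuckets (key : List Char → Char) (D : List Char) (hD : D.Pairwise (· < ·))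
    (ys : List (List Char)) (hys : ∀ w ∈ ys, key w ∈ D) :
    PySem.List.sorted ys key false = D.flatMap (fun d => ys.filter (fun w => key w == d)) := by
  induction ys using List.reverseRecOn with
  | nil => simp [PySem.List.sorted_eq_foldl_insertBy]
  | append_singleton ys x ih =>
    have hx : key x ∈ D := hys x (by simp)
    have hys' : ∀ w ∈ ys, key w ∈ D := fun w hw => hys w (by simp [hw])
    rw [PySem.List.sorted_eq_foldl_insertBy, List.foldl_append, List.foldl_cons, List.foldl_nil,
      ← PySem.List.sorted_eq_foldl_insertBy, ih hys', pvBucketsInsert key x D hD hx ys]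
    apply List.flatMap_congr
    intro d _
    rw [List.filter_append]
    by_cases h : key x = d
    · have ht : (key x == d) = true := by simp [h]
      rw [ht]
      simp [List.filter, ht]
    · have hf : (key x == d) = false := by simp [h]
      rw [hf]
      simp [List.filter, hf]

-- pointwise: A's test for digit d equals B's filter conjoined with key = d
theorem pvPoint (d : Char) (hd : d ∈ "123456789".toList) (w : List Char) :
    ((PySem.List.pyGet? w (-1)).map (fun c => [c]) == some [d])
      = ((pvKey w == d) && pvB w) := by
  have hds : d ≠ ' ' := by
    intro h; rw [h] at hd; simp at hd
  cases h : PySem.List.pyGet? w (-1) with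
  | none => simp [pvKey, pvB, h]
  | some c =>
    by_cases hcd : c = d
    · subst hcd
      simp [pvKey, pvB, h]
      simpa using hd
    · simp [pvKey, pvB, h, hcd]

-- a word passing B's filter has its key among the digits
theorem pvKeyMem (w : List Char) (h : pvB w = true) : pvKey w ∈ "123456789".toList := by
  unfold pvB at h
  cases hg : PySem.List.pyGet? w (-1) with
  | none => rw [hg] at h; simp at h
  | some c =>
    rw [hg] at h
    simp [pvKey, hg]
    simpa using h

theorem pvDigitsPairwise : ("123456789".toList).Pairwise (· < ·) := by decide

-- per digit: A's bucket equals B's (filtered) bucket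
theorem pvBucketEq (sarray : List (List Char)) (d : Char) (hd : d ∈ "123456789".toList) :
    sarray.filter (fun w =>
        (PySem.List.pyGet? w (-1)).map (fun c => [c]) == some [d])
      = (sarray.filter pvB).filter (fun w => pvKey w == d) := by
  rw [List.filter_filter]
  apply List.filter_congr
  intro w _
  rw [pvPoint d hd w]

theorem pvMain (s : String) : sortSentence s = sortSentence_alt s := by
  unfold sortSentence sortSentence_alt
  dsimp only
  have hrange : PySem.List.pyRange 1 10 1 = [1, 2, 3, 4, 5, 6, 7, 8, 9] := by decide
  rw [hrange, pvOuter]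
  have hfilter : (fun w : List Char =>
      match PySem.List.pyGet? w (-1) with
      | some c => ("123456789".toList).contains c
      | none => false) = pvB := by
    funext w; unfold pvB; rfl
  rw [hfilter]
  have hkey : (fun w : List Char => (PySem.List.pyGet? w (-1)).getD ' ') = pvKey := rfl
  rw [hkey]
  set sarray := PySem.Chars.split₀ s.toList with hsar
  have hmem : ∀ w ∈ sarray.filter pvB, pvKey w ∈ "123456789".toList := by
    intro w hw
    exact pvKeyMem w (List.of_mem_filter hw)
  rw [pvSortedBuckets pvKey _ pvDigitsPairwise _ hmem]
  rw [pvJoinNil]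
  rw [← List.flatMap_def, List.flatMap_assoc]
  congr 2
  have h1 := pvBucketEq sarray '1' (by decide)
  have h2 := pvBucketEq sarray '2' (by decide)
  have h3 := pvBucketEq sarray '3' (by decide)
  have h4 := pvBucketEq sarray '4' (by decide)
  have h5 := pvBucketEq sarray '5' (by decide)
  have h6 := pvBucketEq sarray '6' (by decide)
  have h7 := pvBucketEq sarray '7' (by decide)
  have h8 := pvBucketEq sarray '8' (by decide)
  have h9 := pvBucketEq sarray '9' (by decide)
  have t1 : (PySem.Int.toStr 1).toList = ['1'] := by decide
  have t2 : (PySem.Int.toStr 2).toList = ['2'] := by decide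
  have t3 : (PySem.Int.toStr 3).toList = ['3'] := by decide
  have t4 : (PySem.Int.toStr 4).toList = ['4'] := by decide
  have t5 : (PySem.Int.toStr 5).toList = ['5'] := by decide
  have t6 : (PySem.Int.toStr 6).toList = ['6'] := by decide
  have t7 : (PySem.Int.toStr 7).toList = ['7'] := by decide
  have t8 : (PySem.Int.toStr 8).toList = ['8'] := by decide
  have t9 : (PySem.Int.toStr 9).toList = ['9'] := by decide
  simp only [List.flatMap_cons, List.flatMap_nil, List.append_nil,
    t1, t2, t3, t4, t5, t6, t7, t8, t9, h1, h2, h3, h4, h5, h6, h7, h8, h9,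
    show ("123456789".toList) = ['1','2','3','4','5','6','7','8','9'] from by decide]
  rfl

-- ===== VERDICT (by name: the statement is the Claim_ definition above) =====
theorem sortSentence_spec : Claim_equal_sortSentence := by
  intro s _
  unfold Spec_sortSentence
  exact pvMain s
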